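-- pv_equiv track=rewrite | github.com/eslambakr/CoT3D_VG | extract_anchors/extraction_utils.py | on_3dobject
-- ===== SOURCE A (Python) =====
-- def on_3dobject(obj, objs_list):
--     if len(objs_list) == 0:
--         return None
--     # Sort objects in objs_list based on their distance from obj on the z-axis
--     objs_list_sorted = sorted(objs_list, key=lambda x: abs(x[2]-obj[2]))
--
--     # Find the first object in objs_list_sorted that is above obj on the z-axis
--     for o in objs_list_sorted:
--         if o[2] > obj[2]:
--             return o
--
--     # If no object is found above obj on the z-axis, return the closest object on the z-axis
--     return objs_list_sorted[0]
-- ===== SOURCE B (Python) =====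
-- def on_3dobject(obj, objs_list):
--     if len(objs_list) == 0:
--         return None
--     z = obj[2]
--     # Closest object strictly above obj on z (min of z-gap; min keeps the earliest on ties,
--     # matching the stable sort), else the closest object overall on z.
--     above = min((o for o in objs_list if o[2] > z), key=lambda o: o[2] - z, default=None)
--     if above is not None:
--         return above
--     return min(objs_list, key=lambda o: abs(o[2] - z))
-- ===== Notes on version B (the rewrite author's own statement) =====
-- stated objective: idiomatic
-- what changed: Replaced sorting the whole list by z-distance and scanning it with two linear min()-with-key passes: min over the objects strictly above obj on z (default None), else min over all by |z-gap|; min keeps the earliest element on ties, matching the stable sort.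
import Mathlib
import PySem

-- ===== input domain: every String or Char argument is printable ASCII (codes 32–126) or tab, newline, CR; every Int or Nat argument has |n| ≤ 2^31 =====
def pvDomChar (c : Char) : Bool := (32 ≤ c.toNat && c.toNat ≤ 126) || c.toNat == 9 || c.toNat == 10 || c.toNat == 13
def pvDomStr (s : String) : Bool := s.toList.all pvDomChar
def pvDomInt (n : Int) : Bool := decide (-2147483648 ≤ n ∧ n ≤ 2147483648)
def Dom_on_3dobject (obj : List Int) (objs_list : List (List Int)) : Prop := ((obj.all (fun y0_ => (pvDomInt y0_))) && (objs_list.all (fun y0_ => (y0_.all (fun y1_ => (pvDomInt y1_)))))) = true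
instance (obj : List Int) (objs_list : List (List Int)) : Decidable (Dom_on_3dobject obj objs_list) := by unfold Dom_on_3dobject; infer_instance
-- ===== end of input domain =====

-- B replaces A's sort-then-scan by two linear min()-passes: the closest object above obj on z if any,
-- else the closest overall (min keeps the earliest on ties, matching the stable sort).

-- ===== PORT A =====
-- pyGetD's default 0 is never reached under Pre_ (every indexed list has length ≥ 3 there).
def on_3dobject (obj : List Int) (objs_list : List (List Int)) : Option (List Int) :=
  if objs_list.length = 0 then none
  else
    let z := PySem.List.pyGetD obj 2 0
    let s := PySem.List.sorted objs_list (fun x => |PySem.List.pyGetD x 2 0 - z|) false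
    match s.find? (fun o => decide (PySem.List.pyGetD o 2 0 > z)) with
    | some o => some o
    | none => PySem.List.pyGet? s 0

-- ===== PORT B =====
def on_3dobject_alt (obj : List Int) (objs_list : List (List Int)) : Option (List Int) :=
  if objs_list.length = 0 then none
  else
    let z := PySem.List.pyGetD obj 2 0
    match PySem.List.min? (objs_list.filter (fun o => decide (PySem.List.pyGetD o 2 0 > z)))
        (fun o => PySem.List.pyGetD o 2 0 - z) with
    | some above => some above
    | none => PySem.List.min? objs_list (fun o => |PySem.List.pyGetD o 2 0 - z|)

-- ===== PRECONDITION & SPEC =====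
-- Pre_ excludes exactly the inputs where Python raises IndexError: a nonempty objs_list with obj or some member shorter than 3.
def Pre_on_3dobject (obj : List Int) (objs_list : List (List Int)) : Prop :=
  objs_list = [] ∨ (3 ≤ obj.length ∧ ∀ o ∈ objs_list, 3 ≤ o.length)
instance (obj : List Int) (objs_list : List (List Int)) : Decidable (Pre_on_3dobject obj objs_list) := by unfold Pre_on_3dobject; infer_instance

def pvWitness_on_3dobject : List Int × List (List Int) := ([0, 0, 0], [[1, 1, 1], [2, 2, -1]])

def Spec_on_3dobject (obj : List Int) (objs_list : List (List Int)) (out : Option (List Int)) : Prop := out = on_3dobject_alt obj objs_list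
instance (obj : List Int) (objs_list : List (List Int)) (out : Option (List Int)) : Decidable (Spec_on_3dobject obj objs_list out) := by unfold Spec_on_3dobject; infer_instance

-- ===== CLAIM (what is proved, stated in full; the proofs are below) =====
def Claim_equal_on_3dobject : Prop := ∀ (obj : List Int) (objs_list : List (List Int)), Dom_on_3dobject obj objs_list → Pre_on_3dobject obj objs_list → Spec_on_3dobject obj objs_list (on_3dobject obj objs_list)

-- ===== LEMMAS AND PROOFS =====

theorem insertBy_find? {α : Type} (key : α → Int) (p : α → Bool) (x : α) (ys : List α)
    (hys : ys.Pairwise (fun a b => key a ≤ key b)) :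
    (PySem.List.insertBy (fun a b => decide (key a < key b)) x ys).find? p =
      match ys.find? p with
      | none => if p x then some x else none
      | some m => if p x ∧ key x < key m then some x else some m := by
  induction ys with
  | nil => cases hpx : p x <;> simp [PySem.List.insertBy, hpx]
  | cons y ys ih =>
    rw [List.pairwise_cons] at hys
    by_cases hxy : key x < key y
    · simp only [PySem.List.insertBy, hxy, decide_true, if_true]
      cases hpx : p x
      · cases hfy : (y :: ys).find? p with
        | none => simp [hpx, hfy]
        | some m =>
          simp [hpx]
          cases hpy : p y
          · rw [List.find?_cons_of_neg (by simp [hpy])] at hfy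
            exact Or.inr ⟨rfl, hfy⟩
          · rw [List.find?_cons_of_pos (by simp [hpy])] at hfy
            exact Or.inl ⟨rfl, by injection hfy⟩
      · cases hfy : (y :: ys).find? p with
        | none => simp [hpx]
        | some m =>
          have hm : m ∈ y :: ys := List.mem_of_find?_eq_some hfy
          have hym : key y ≤ key m := by
            rcases List.mem_cons.mp hm with h | h
            · simp [h]
            · exact hys.1 m h
          simp [hpx, lt_of_lt_of_le hxy hym]
    · have hd : (decide (key x < key y)) = false := by simp [hxy]
      simp only [PySem.List.insertBy, hd, Bool.false_eq_true, if_false]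
      cases hpy : p y
      · rw [List.find?_cons_of_neg (by simp [hpy]), List.find?_cons_of_neg (by simp [hpy])]
        exact ih hys.2
      · simp [hpy, hxy]

-- one insertion step, seen by head?

theorem insertBy_head? {α : Type} (key : α → Int) (x : α) (ys : List α) :
    (PySem.List.insertBy (fun a b => decide (key a < key b)) x ys).head? =
      match ys.head? with
      | none => some x
      | some y => if key x < key y then some x else some y := by
  cases ys with
  | nil => simp [PySem.List.insertBy]
  | cons y t => by_cases h : key x < key y <;> simp [PySem.List.insertBy, h]

-- appending one element to the input adds one insertion to the stable sort

theorem sorted_append_singleton {α : Type} (key : α → Int) (xs : List α) (x : α) :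
    PySem.List.sorted (xs ++ [x]) key false =
      PySem.List.insertBy (fun a b => decide (key a < key b)) x (PySem.List.sorted xs key false) := by
  rw [PySem.List.sorted_eq_foldl_insertBy, PySem.List.sorted_eq_foldl_insertBy, List.foldl_append]
  rfl

-- B's closest-above pass computes A's "first sorted element above z" (with its key)

theorem pyGet?_zero_head? {α : Type} (s : List α) (h : s ≠ []) :
    PySem.List.pyGet? s 0 = s.head? := by
  cases s with
  | nil => simp at h
  | cons a t => simp [PySem.List.pyGet?, PySem.List.pyIdx?]

-- min over an extended list takes one strict-comparison step (ties keep the earlier element)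
theorem min?_append_singleton {α : Type} (key : α → Int) (l : List α) (x : α) :
    PySem.List.min? (l ++ [x]) key =
      match PySem.List.min? l key with
      | none => some x
      | some m => if key x < key m then some x else some m := by
  simp only [PySem.List.min?, List.foldl_append, List.foldl_cons, List.foldl_nil]
  rfl

-- B's overall min is the head of A's stably sorted list
theorem minAll_eq (z : Int) (xs : List (List Int)) :
    PySem.List.min? xs (fun o => |PySem.List.pyGetD o 2 0 - z|) =
      (PySem.List.sorted xs (fun x => |PySem.List.pyGetD x 2 0 - z|) false).head? := by
  induction xs using List.reverseRecOn with
  | nil => simp [PySem.List.min?, PySem.List.sorted]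
  | append_singleton xs x ih =>
    rw [min?_append_singleton, ih, sorted_append_singleton,
      insertBy_head? (fun x => |PySem.List.pyGetD x 2 0 - z|) x]

-- B's min over the objects above z is A's first sorted element above z
theorem minAbove_eq (z : Int) (xs : List (List Int)) :
    PySem.List.min? (xs.filter (fun o => decide (PySem.List.pyGetD o 2 0 > z)))
        (fun o => PySem.List.pyGetD o 2 0 - z) =
      (PySem.List.sorted xs (fun x => |PySem.List.pyGetD x 2 0 - z|) false).find?
        (fun o => decide (PySem.List.pyGetD o 2 0 > z)) := by
  induction xs using List.reverseRecOn with
  | nil => simp [PySem.List.min?, PySem.List.sorted]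
  | append_singleton xs x ih =>
    rw [List.filter_append, sorted_append_singleton,
      insertBy_find? (fun x => |PySem.List.pyGetD x 2 0 - z|) _ x _
        (PySem.List.sorted_pairwise xs (fun x => |PySem.List.pyGetD x 2 0 - z|))]
    by_cases hp : PySem.List.pyGetD x 2 0 > z
    · have hpx : (decide (PySem.List.pyGetD x 2 0 > z)) = true := by simpa using hp
      simp only [List.filter_singleton, hpx, cond_true]
      rw [min?_append_singleton, ih]
      cases hf : (PySem.List.sorted xs (fun x => |PySem.List.pyGetD x 2 0 - z|) false).find?
          (fun o => decide (PySem.List.pyGetD o 2 0 > z)) with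
      | none => simp
      | some m =>
        have hpm : PySem.List.pyGetD m 2 0 > z := by
          have := List.find?_some hf
          simpa using this
        have hax : |PySem.List.pyGetD x 2 0 - z| = PySem.List.pyGetD x 2 0 - z :=
          abs_of_pos (by omega)
        have ham : |PySem.List.pyGetD m 2 0 - z| = PySem.List.pyGetD m 2 0 - z :=
          abs_of_pos (by omega)
        simp [hax, ham]
    · have hpx : (decide (PySem.List.pyGetD x 2 0 > z)) = false := by simpa using hp
      simp only [List.filter_singleton, hpx, cond_false, List.append_nil, ih]
      cases (PySem.List.sorted xs (fun x => |PySem.List.pyGetD x 2 0 - z|) false).find?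
          (fun o => decide (PySem.List.pyGetD o 2 0 > z)) <;> simp

-- ===== VERDICT (by name: the statement is the Claim_ definition above) =====
theorem on_3dobject_spec : Claim_equal_on_3dobject := by
  intro obj objs _ _
  unfold Spec_on_3dobject on_3dobject on_3dobject_alt
  by_cases h0 : objs.length = 0
  · simp [h0]
  · simp only [h0, if_false]
    rw [minAbove_eq, minAll_eq]
    have hne : PySem.List.sorted objs
        (fun x => |PySem.List.pyGetD x 2 0 - PySem.List.pyGetD obj 2 0|) false ≠ [] := by
      intro hnil
      exact h0 (by simpa using congrArg List.length ((PySem.List.sorted_eq_nil_iff _ _ _).mp hnil))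
    cases (PySem.List.sorted objs
        (fun x => |PySem.List.pyGetD x 2 0 - PySem.List.pyGetD obj 2 0|) false).find?
        (fun o => decide (PySem.List.pyGetD o 2 0 > PySem.List.pyGetD obj 2 0)) with
    | some m => simp
    | none => simp [pyGet?_zero_head? _ hne]
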